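-- pv_equiv track=rewrite | github.com/whateverworks02/AoC_2025 | day07/logic.py | cnt_multi_universe
-- ===== SOURCE A (Python) =====
-- from typing import List, Tuple
--
-- def cnt_multi_universe(grid: List[List[bool]], start: int) -> int:
--     m, n = len(grid), len(grid[0])
--     f = [[0] * n for _ in range(m)]
--     f[0][start] = 1
--
--     for i in range(1, m):
--         for j in range(n):
--             if j - 1 >= 0 and grid[i - 1][j - 1]:
--                 f[i][j] += f[i - 1][j - 1]
--             if j + 1 < n and grid[i - 1][j + 1]:
--                 f[i][j] += f[i - 1][j + 1]
--             if not grid[i - 1][j]: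
--                 f[i][j] += f[i - 1][j]
--
--     return sum(f[-1])
-- ===== SOURCE B (Python) =====
-- from typing import List, Tuple
--
-- def cnt_multi_universe(grid: List[List[bool]], start: int) -> int:
--     # Suffix DP: w[k] = number of timelines from cell (i, k) down to the last row.
--     n = len(grid[0])
--     w = [1] * n
--     for row in reversed(grid[:-1]):
--         w = [((w[k - 1] if k > 0 else 0) + (w[k + 1] if k + 1 < n else 0))
--              if row[k] else w[k]
--              for k in range(n)]
--     return w[start]
-- ===== Notes on version B (the rewrite author's own statement) =====
-- stated objective: alternative
-- what changed: A builds the full m-by-n forward DP table of path counts from the start cell and sums its last row; B runs the DP backwards, keeping a single row of suffix counts (paths from each cell down to the bottom) over the rows in reverse, and reads off the entry at the start column, using O(n) space instead of O(m*n).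
import Mathlib
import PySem

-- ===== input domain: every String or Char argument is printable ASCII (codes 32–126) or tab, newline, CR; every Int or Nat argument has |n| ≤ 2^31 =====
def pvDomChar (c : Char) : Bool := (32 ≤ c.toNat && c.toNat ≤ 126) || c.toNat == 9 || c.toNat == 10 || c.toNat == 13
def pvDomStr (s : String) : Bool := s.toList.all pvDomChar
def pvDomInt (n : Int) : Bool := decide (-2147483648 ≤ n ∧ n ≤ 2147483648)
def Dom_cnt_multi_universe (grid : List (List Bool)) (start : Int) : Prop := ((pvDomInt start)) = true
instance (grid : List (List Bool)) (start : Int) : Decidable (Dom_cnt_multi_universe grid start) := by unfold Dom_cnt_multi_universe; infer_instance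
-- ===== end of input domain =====

-- B replaces A's forward path-count table (paths from the start cell, summed over the last
-- row) by a single backward suffix-DP row (paths from each cell down to the last row, read
-- off at the start column); same exact results, O(n) space instead of O(m·n).

-- ===== PORT A =====
-- inner j-loop of A: row i of the table from row i-1 and grid row i-1 (the three guarded adds)
def gRow (n : Nat) (g : List Bool) (p : List Int) : List Int :=
  (List.range n).map (fun j =>
    (if 1 ≤ j ∧ g.getD (j-1) false then p.getD (j-1) 0 else 0)
    + (if j+1 < n ∧ g.getD (j+1) false then p.getD (j+1) 0 else 0)
    + (if !(g.getD j false) then p.getD j 0 else 0))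

def cnt_multi_universe (grid : List (List Bool)) (start : Int) : Int :=
  let m := grid.length
  let n := (grid.getD 0 []).length            -- len(grid[0]); grid = [] is excluded by Pre_
  let f0 : List (List Int) := List.replicate m (List.replicate n 0)
  -- f[0][start] = 1  (Python index: negative start counts from the end)
  let f1 := PySem.List.pySetD f0 0 (PySem.List.pySetD (PySem.List.pyGetD f0 0 []) start 1)
  -- for i in range(1, m): for j in range(n): the three guarded additions
  let f2 := (List.range' 1 (m - 1)).foldl
    (fun f i => f.set i (gRow n (grid.getD (i-1) []) (f.getD (i-1) []))) f1
  (PySem.List.pyGetD f2 (-1) []).sum          -- sum(f[-1])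

-- ===== PORT B =====
-- one backward step: w'[k] = number of paths from cell (i,k) to the bottom, given w for row i+1
def bRow (n : Nat) (g : List Bool) (w : List Int) : List Int :=
  (List.range n).map (fun k =>
    if g.getD k false then
      (if 1 ≤ k then w.getD (k-1) 0 else 0) + (if k+1 < n then w.getD (k+1) 0 else 0)
    else w.getD k 0)

def cnt_multi_universe_alt (grid : List (List Bool)) (start : Int) : Int :=
  let n := (grid.getD 0 []).length            -- len(grid[0])
  -- for row in reversed(grid[:-1]): w = [... for k in range(n)]
  let w := ((PySem.List.slice grid none (some (-1))).reverse).foldl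
    (fun w row => bRow n row w) (List.replicate n 1)
  PySem.List.pyGetD w start 0                 -- return w[start]

-- ===== PRECONDITION & SPEC =====
-- Pre_ excludes exactly the inputs where A raises IndexError: the empty grid, a start index
-- outside Python's [-n, n) range, and ragged grids whose non-last rows are shorter than row 0.
def Pre_cnt_multi_universe (grid : List (List Bool)) (start : Int) : Prop :=
  grid ≠ [] ∧ -(((grid.getD 0 []).length : Int)) ≤ start ∧ start < ((grid.getD 0 []).length : Int)
  ∧ ∀ i < grid.length - 1, (grid.getD 0 []).length ≤ (grid.getD i []).length
instance (grid : List (List Bool)) (start : Int) : Decidable (Pre_cnt_multi_universe grid start) := by unfold Pre_cnt_multi_universe; infer_instance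

def pvWitness_cnt_multi_universe : List (List Bool) × Int := ([[true, false], [false, false]], 0)

def Spec_cnt_multi_universe (grid : List (List Bool)) (start : Int) (out : Int) : Prop := out = cnt_multi_universe_alt grid start
instance (grid : List (List Bool)) (start : Int) (out : Int) : Decidable (Spec_cnt_multi_universe grid start out) := by unfold Spec_cnt_multi_universe; infer_instance

-- ===== CLAIM (what is proved, stated in full; the proofs are below) =====
def Claim_equal_cnt_multi_universe : Prop := ∀ (grid : List (List Bool)) (start : Int), Dom_cnt_multi_universe grid start → Pre_cnt_multi_universe grid start → Spec_cnt_multi_universe grid start (cnt_multi_universe grid start)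

-- ===== LEMMAS AND PROOFS =====

-- the normalised (Python negative-wrap) start column
def sIdx (n : Nat) (start : Int) : Nat := if 0 ≤ start then start.toNat else n - (-start).toNat

-- A's table rows as a pure recurrence
def Rseq (n s : Nat) (grid : List (List Bool)) : Nat → List Int
  | 0 => (List.replicate n 0).set s 1
  | (i+1) => gRow n (grid.getD i []) (Rseq n s grid i)

-- inner product over the first n entries
def dot (n : Nat) (a b : List Int) : Int := ∑ j ∈ Finset.range n, a.getD j 0 * b.getD j 0

lemma length_gRow (n : Nat) (g : List Bool) (p : List Int) : (gRow n g p).length = n := by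
  simp [gRow]

lemma length_bRow (n : Nat) (g : List Bool) (w : List Int) : (bRow n g w).length = n := by
  simp [bRow]

-- ADJOINT: one forward (gather) step against w equals p against one backward (scatter) step
lemma dot_gRow_bRow (n : Nat) (g : List Bool) (p w : List Int) :
    dot n (gRow n g p) w = dot n p (bRow n g w) := by
  rcases n with _ | N
  · simp [dot]
  have hL : dot (N+1) (gRow (N+1) g p) w
      = (∑ j ∈ Finset.range (N+1), (if 1 ≤ j ∧ g.getD (j-1) false then p.getD (j-1) 0 * w.getD j 0 else 0))
      + ((∑ j ∈ Finset.range (N+1), (if j+1 < N+1 ∧ g.getD (j+1) false then p.getD (j+1) 0 * w.getD j 0 else 0))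
      + (∑ j ∈ Finset.range (N+1), (if !(g.getD j false) then p.getD j 0 * w.getD j 0 else 0))) := by
    unfold dot
    rw [← Finset.sum_add_distrib, ← Finset.sum_add_distrib]
    refine Finset.sum_congr rfl fun j hj => ?_
    rw [Finset.mem_range] at hj
    simp only [gRow]
    rw [PySem.List.getD_map_range _ _ _ _ hj]
    split_ifs <;> ring
  have hR : dot (N+1) p (bRow (N+1) g w)
      = (∑ k ∈ Finset.range (N+1), (if g.getD k false ∧ k+1 < N+1 then p.getD k 0 * w.getD (k+1) 0 else 0))
      + ((∑ k ∈ Finset.range (N+1), (if g.getD k false ∧ 1 ≤ k then p.getD k 0 * w.getD (k-1) 0 else 0))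
      + (∑ k ∈ Finset.range (N+1), (if !(g.getD k false) then p.getD k 0 * w.getD k 0 else 0))) := by
    unfold dot
    rw [← Finset.sum_add_distrib, ← Finset.sum_add_distrib]
    refine Finset.sum_congr rfl fun k hk => ?_
    rw [Finset.mem_range] at hk
    simp only [bRow]
    rw [PySem.List.getD_map_range _ _ _ _ hk]
    cases hgk : g.getD k false <;> simp [hgk] <;> (split_ifs <;> ring)
  rw [hL, hR]
  congr 1
  · rw [Finset.sum_range_succ' (fun j => if 1 ≤ j ∧ g.getD (j-1) false then p.getD (j-1) 0 * w.getD j 0 else 0),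
        Finset.sum_range_succ (fun k => if g.getD k false ∧ k+1 < N+1 then p.getD k 0 * w.getD (k+1) 0 else 0)]
    have e0 : (if (1:Nat) ≤ 0 ∧ g.getD (0-1) false then p.getD (0-1) 0 * w.getD 0 0 else 0) = 0 := by
      norm_num
    have eN : (if g.getD N false ∧ N+1 < N+1 then p.getD N 0 * w.getD (N+1) 0 else 0) = 0 := by
      simp
    simp only [e0, eN, add_zero]
    refine Finset.sum_congr rfl fun i hi => ?_
    rw [Finset.mem_range] at hi
    simp only [Nat.add_sub_cancel]
    exact if_congr ⟨fun h => ⟨h.2, by omega⟩, fun h => ⟨by omega, h.1⟩⟩ rfl rfl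
  · rw [Finset.sum_range_succ (fun j => if j+1 < N+1 ∧ g.getD (j+1) false then p.getD (j+1) 0 * w.getD j 0 else 0),
        Finset.sum_range_succ' (fun k => if g.getD k false ∧ 1 ≤ k then p.getD k 0 * w.getD (k-1) 0 else 0)]
    have eN : (if N+1 < N+1 ∧ g.getD (N+1) false then p.getD (N+1) 0 * w.getD N 0 else 0) = 0 := by
      simp
    have e0 : (if g.getD 0 false ∧ (1:Nat) ≤ 0 then p.getD 0 0 * w.getD (0-1) 0 else 0) = 0 := by
      norm_num
    simp only [e0, eN, add_zero]
    congr 1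
    refine Finset.sum_congr rfl fun i hi => ?_
    rw [Finset.mem_range] at hi
    simp only [Nat.add_sub_cancel]
    exact if_congr ⟨fun h => ⟨h.2, by omega⟩, fun h => ⟨by omega, h.1⟩⟩ rfl rfl

lemma dot_foldl (n : Nat) (rows : List (List Bool)) (p w : List Int) :
    dot n (rows.foldl (fun p g => gRow n g p) p) w
      = dot n p (rows.reverse.foldl (fun w g => bRow n g w) w) := by
  induction rows generalizing p w with
  | nil => simp
  | cons g rs ih =>
      simp only [List.foldl_cons, List.reverse_cons, List.foldl_append, List.foldl_cons,
        List.foldl_nil]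
      rw [ih, dot_gRow_bRow]

lemma Rseq_eq_foldl (n s : Nat) (grid : List (List Bool)) (t : Nat) (ht : t ≤ grid.length) :
    Rseq n s grid t = (grid.take t).foldl (fun p g => gRow n g p) (Rseq n s grid 0) := by
  induction t with
  | zero => simp
  | succ i ih =>
      rw [List.take_add_one, List.foldl_append, ← ih (by omega)]
      have : grid[i]?.toList = [grid[i]] := by
        rw [List.getElem?_eq_getElem (by omega)]; rfl
      rw [this]
      simp only [List.foldl_cons, List.foldl_nil, Rseq]
      congr 1
      rw [List.getD_eq_getElem?_getD, List.getElem?_eq_getElem (by omega)]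
      rfl

lemma length_Rseq (n s : Nat) (grid : List (List Bool)) (t : Nat) :
    (Rseq n s grid t).length = n := by
  cases t with
  | zero => simp [Rseq]
  | succ i => simp [Rseq, length_gRow]

lemma sum_getD (a : List Int) : a.sum = ∑ j ∈ Finset.range a.length, a.getD j 0 := by
  induction a with
  | nil => simp
  | cons x xs ih =>
      simp only [List.length_cons, Finset.sum_range_succ']
      simp only [List.getD_eq_getElem?_getD] at ih ⊢
      simp [ih]
      ring

lemma sum_eq_dot_ones (n : Nat) (a : List Int) (h : a.length = n) :
    a.sum = dot n a (List.replicate n 1) := by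
  rw [sum_getD, h]
  unfold dot
  refine Finset.sum_congr rfl (fun j hj => ?_)
  rw [Finset.mem_range] at hj
  rw [List.getD_eq_getElem?_getD (l := List.replicate n 1), List.getElem?_replicate]
  simp [hj]

lemma dot_basis (n s : Nat) (hs : s < n) (w : List Int) :
    dot n ((List.replicate n 0).set s 1) w = w.getD s 0 := by
  unfold dot
  rw [Finset.sum_eq_single s]
  · rw [List.getD_eq_getElem?_getD, List.getElem?_set_self (by simpa)]
    simp
  · intro j hj hne
    rw [List.getD_eq_getElem?_getD, List.getElem?_set_ne (by omega)]
    simp [List.getElem?_replicate]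
    simp_all
  · intro h; exact absurd (Finset.mem_range.mpr hs) h

-- A's table loop: after the whole loop, row k is Rseq k (for k ≤ m-1)
lemma tableA (grid : List (List Bool)) (n s : Nat) (hm : grid ≠ [])
    (T0 : List (List Int)) (hlen : T0.length = grid.length)
    (h0 : T0.getD 0 [] = Rseq n s grid 0) :
    ∀ t, t ≤ grid.length - 1 →
      ((List.range' 1 t).foldl
        (fun f i => f.set i (gRow n (grid.getD (i-1) []) (f.getD (i-1) []))) T0).length
          = grid.length
      ∧ ∀ k ≤ t, ((List.range' 1 t).foldl
        (fun f i => f.set i (gRow n (grid.getD (i-1) []) (f.getD (i-1) []))) T0).getD k []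
          = Rseq n s grid k := by
  intro t
  induction t with
  | zero =>
      intro _
      refine ⟨hlen, fun k hk => ?_⟩
      interval_cases k
      exact h0

  | succ i ih =>
      intro ht
      obtain ⟨ihlen, ihrow⟩ := ih (by omega)
      rw [List.range'_1_concat, List.foldl_append]
      simp only [List.foldl_cons, List.foldl_nil]
      constructor
      · simpa using ihlen
      · intro k hk
        have hmlen : grid.length ≠ 0 := by simpa using hm
        have h1i : 1 + i < grid.length := by omega
        by_cases hki : k = 1 + i
        · subst hki
          rw [List.getD_eq_getElem?_getD, List.getElem?_set_self (by omega)]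
          simp only [Option.getD_some]
          have : 1 + i - 1 = i := by omega
          rw [this, ihrow i (le_refl i)]
          have : 1 + i = i + 1 := by omega
          rw [this, Rseq]
        · rw [List.getD_eq_getElem?_getD, List.getElem?_set_ne (by omega),
            ← List.getD_eq_getElem?_getD]
          exact ihrow k (by omega)

lemma length_foldl_bRow (n : Nat) (rows : List (List Bool)) (w : List Int) (h : w.length = n) :
    (rows.foldl (fun w row => bRow n row w) w).length = n := by
  induction rows generalizing w with
  | nil => simpa
  | cons r rs ih => exact ih _ (length_bRow n r w)

lemma pyGetD_eq_getD_sIdx (w : List Int) (start : Int) (n : Nat) (hw : w.length = n)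
    (h1 : -(n:Int) ≤ start) (h2 : start < (n:Int)) :
    PySem.List.pyGetD w start 0 = w.getD (sIdx n start) 0 := by
  unfold PySem.List.pyGetD PySem.List.pyGet? PySem.List.pyIdx? sIdx
  subst hw
  split <;> simp_all [List.getD_eq_getElem?_getD]

lemma pySetD_eq_set_sIdx (a : List Int) (start : Int) (v : Int) (n : Nat) (ha : a.length = n)
    (h1 : -(n:Int) ≤ start) (h2 : start < (n:Int)) :
    PySem.List.pySetD a start v = a.set (sIdx n start) v := by
  unfold PySem.List.pySetD PySem.List.pySet? PySem.List.pyIdx? sIdx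
  subst ha
  split <;> simp_all

lemma sIdx_lt (n : Nat) (start : Int) (h1 : -(n:Int) ≤ start) (h2 : start < (n:Int)) :
    sIdx n start < n := by
  unfold sIdx; split <;> omega

-- ===== VERDICT (by name: the statement is the Claim_ definition above) =====
theorem cnt_multi_universe_spec : Claim_equal_cnt_multi_universe := by
  intro grid start _ hPre
  obtain ⟨hne, h1, h2, _⟩ := hPre
  unfold Spec_cnt_multi_universe
  simp only [cnt_multi_universe, cnt_multi_universe_alt]
  set m := grid.length with hm
  set n := (grid.getD 0 []).length with hn
  set s := sIdx n start with hs
  have hm1 : 1 ≤ m := by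
    simp only [hm]
    cases grid with
    | nil => exact absurd rfl hne
    | cons _ _ => simp
  have hslt : s < n := sIdx_lt n start h1 h2
  -- initial table
  have hget0 : PySem.List.pyGetD (List.replicate m (List.replicate n (0:Int))) 0 [] = List.replicate n 0 := by
    rw [PySem.List.pyGetD_zero, List.getD_eq_getElem?_getD, List.getElem?_replicate]
    have : 0 < m := by omega
    simp [this]
  have hrow0 : PySem.List.pySetD (List.replicate n (0:Int)) start 1 = Rseq n s grid 0 := by
    rw [pySetD_eq_set_sIdx _ _ _ n (by simp) h1 h2]
    rfl
  have hf1 : PySem.List.pySetD (List.replicate m (List.replicate n (0:Int))) 0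
      (PySem.List.pySetD (PySem.List.pyGetD (List.replicate m (List.replicate n (0:Int))) 0 []) start 1)
      = (List.replicate m (List.replicate n (0:Int))).set 0 (Rseq n s grid 0) := by
    rw [hget0, hrow0]
    have hm0 : (0:Int) < (m:Int) := by exact_mod_cast hm1
    simp [PySem.List.pySetD, PySem.List.pySet?, PySem.List.pyIdx?, show 0 < m by omega]
  rw [hf1]
  -- the table after A's loop
  obtain ⟨hlen, hrow⟩ := tableA grid n s hne
    ((List.replicate m (List.replicate n (0:Int))).set 0 (Rseq n s grid 0))
    (by simp [hm]) (by
      rw [List.getD_eq_getElem?_getD, List.getElem?_set_self (by simp; omega)]; rfl)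
    (m - 1) (le_refl _)
  set F := (List.range' 1 (m-1)).foldl
    (fun f i => f.set i (gRow n (grid.getD (i-1) []) (f.getD (i-1) []))) 
    ((List.replicate m (List.replicate n (0:Int))).set 0 (Rseq n s grid 0)) with hF
  have hFne : F ≠ [] := by
    intro h
    rw [h] at hlen
    simp at hlen
    omega
  have hlast : PySem.List.pyGetD F (-1) [] = Rseq n s grid (m-1) := by
    have hFlen : F.length = m := hlen
    have c2 : -(m:Int) ≤ -1 := by
      have : (1:Int) ≤ (m:Int) := by exact_mod_cast hm1
      omega
    simp only [PySem.List.pyGetD, PySem.List.pyGet?, PySem.List.pyIdx?, hFlen]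
    rw [if_neg (by norm_num), if_pos c2]
    rw [← hrow (m-1) (le_refl _), List.getD_eq_getElem?_getD]
    norm_num
  rw [hlast]
  -- A's value as a dot product, transposed to B's backward fold
  rw [sum_eq_dot_ones n _ (length_Rseq n s grid (m-1)),
      Rseq_eq_foldl n s grid (m-1) (by omega), dot_foldl,
      show Rseq n s grid 0 = (List.replicate n 0).set s 1 from rfl, dot_basis n s hslt]
  -- B's side
  rw [PySem.List.slice_to_neg_one]
  rw [pyGetD_eq_getD_sIdx _ _ n
    (length_foldl_bRow n _ _ (by simp)) h1 h2]
  congr 2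
  rw [List.dropLast_eq_take]
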